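-- pv_equiv track=rewrite | github.com/Sword-of-Stars/CS474 | interfaces/auto_explainer_cli.py | cnf_transform_grammar
-- ===== SOURCE A (Python) =====
-- from typing import Any, Dict, List, Set, Tuple
--
-- def cnf_transform_grammar(grammar: Dict[str, List[str]]) -> Dict[str, List[str]]:
--     transformed: Dict[str, List[str]] = {}
--     for variable, rules in grammar.items():
--         transformed_rules: List[str] = []
--         for rule in rules:
--             tr = ""
--             i = 0
--             while i < len(rule):
--                 if (i + 3 < len(rule) and rule[i] == '[' and rule[i+3] == ']'):
--                     tr += rule[i+1] + '_' + rule[i+2]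
--                     i += 4
--                 else:
--                     tr += rule[i]
--                     i += 1
--             transformed_rules.append(tr)
--         transformed[variable] = transformed_rules
--     return transformed
-- ===== SOURCE B (Python) =====
-- import re
--
-- _BRACKET = re.compile(r'\[(.)(.)\]', re.DOTALL)
--
-- def cnf_transform_grammar(grammar):
--     sub = _BRACKET.sub
--     repl = lambda m: m.group(1) + '_' + m.group(2)
--     return {variable: [sub(repl, rule) for rule in rules]
--             for variable, rules in grammar.items()}
-- ===== Notes on version B (the rewrite author's own statement) =====
-- stated objective: idiomatic
-- what changed: Replaced A's manual while-loop index scan with i+=4/i+=1 advances and string accumulation by a single compiled regex substitution re.sub(r'\[(.)(.)\]', ..., flags=re.DOTALL) applied to each rule inside a dict comprehension.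
import Mathlib
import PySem

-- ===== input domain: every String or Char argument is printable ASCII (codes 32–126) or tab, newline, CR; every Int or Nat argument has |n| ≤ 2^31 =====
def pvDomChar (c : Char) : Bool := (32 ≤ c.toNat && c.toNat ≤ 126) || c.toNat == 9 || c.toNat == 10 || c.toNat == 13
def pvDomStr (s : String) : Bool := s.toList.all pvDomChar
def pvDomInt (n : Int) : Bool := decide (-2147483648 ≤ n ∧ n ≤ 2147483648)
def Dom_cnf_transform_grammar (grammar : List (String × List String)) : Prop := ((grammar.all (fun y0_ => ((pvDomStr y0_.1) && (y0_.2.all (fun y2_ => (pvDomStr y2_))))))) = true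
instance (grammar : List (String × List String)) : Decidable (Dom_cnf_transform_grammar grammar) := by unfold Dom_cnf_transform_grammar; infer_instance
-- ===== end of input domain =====

-- B replaces A's manual index/while scan over each rule by a single regex substitution
-- (re.sub of \[(.)(.)\] with DOTALL, ported as structural recursion on the characters): idiomatic, same cost.

-- ===== PORT A =====
-- A's inner while loop: index i over the rule's characters, accumulator tr built by +=.
def cnfLoopA (cs : List Char) (i : Nat) (tr : List Char) : List Char :=
  if _h : i < cs.length then
    if i + 3 < cs.length ∧ cs[i]! = '[' ∧ cs[i+3]! = ']' then
      cnfLoopA cs (i + 4) (tr ++ [cs[i+1]!, '_', cs[i+2]!])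
    else
      cnfLoopA cs (i + 1) (tr ++ [cs[i]!])
  else tr
termination_by cs.length - i

def cnf_transform_grammar (grammar : List (String × List String)) : List (String × List String) :=
  (grammar.foldl
    (fun transformed p =>
      let transformed_rules :=
        p.2.foldl (fun acc rule => acc ++ [String.mk (cnfLoopA rule.toList 0 [])]) []
      transformed.insert p.1 transformed_rules)
    (PySem.Dict.empty)).items

-- ===== PORT B =====
-- re.sub(r'\[(.)(.)\]', lambda m: g1+'_'+g2, rule, DOTALL): left-to-right non-overlapping
-- matching of a 4-char window '[xy]' where x,y are arbitrary characters (DOTALL).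
def cnfSubB : List Char → List Char
  | '[' :: a :: b :: ']' :: rest => a :: '_' :: b :: cnfSubB rest
  | c :: rest => c :: cnfSubB rest
  | [] => []

def cnf_transform_grammar_alt (grammar : List (String × List String)) : List (String × List String) :=
  (grammar.foldl
    (fun d p => d.insert p.1 (p.2.map (fun rule => String.mk (cnfSubB rule.toList))))
    (PySem.Dict.empty)).items

-- ===== PRECONDITION & SPEC =====
def Spec_cnf_transform_grammar (grammar : List (String × List String)) (out : List (String × List String)) : Prop := out = cnf_transform_grammar_alt grammar
instance (grammar : List (String × List String)) (out : List (String × List String)) : Decidable (Spec_cnf_transform_grammar grammar out) := by unfold Spec_cnf_transform_grammar; infer_instance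

-- ===== CLAIM (what is proved, stated in full; the proofs are below) =====
def Claim_equal_cnf_transform_grammar : Prop := ∀ (grammar : List (String × List String)), Dom_cnf_transform_grammar grammar → Spec_cnf_transform_grammar grammar (cnf_transform_grammar grammar)

-- ===== LEMMAS AND PROOFS =====

-- If the head of the list is not the start of a '[xy]' window, cnfSubB keeps it.
lemma cnfSubB_nomatch (c : Char) (rest : List Char)
    (h : ¬ (c = '[' ∧ ∃ a b rest', rest = a :: b :: ']' :: rest')) :
    cnfSubB (c :: rest) = c :: cnfSubB rest := by
  rw [cnfSubB.eq_def]
  split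
  · rename_i a b r heq
    injection heq with h1 h2
    exact absurd ⟨h1, a, b, r, h2⟩ h
  · rename_i c' r heq
    injection heq with h1 h2
    subst h1 h2; rfl
  · rename_i heq; exact absurd heq (by simp)

lemma drop_four (cs : List Char) (i : Nat) (h : i + 3 < cs.length) :
    cs.drop i = cs[i] :: cs[i+1] :: cs[i+2] :: cs[i+3] :: cs.drop (i+4) := by
  rw [List.drop_eq_getElem_cons (by omega), List.drop_eq_getElem_cons (by omega),
      List.drop_eq_getElem_cons (by omega), List.drop_eq_getElem_cons (by omega)]

-- Invariant of A's while loop: from index i on it appends exactly cnfSubB of the remaining suffix.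
lemma cnfLoopA_eq (cs : List Char) (i : Nat) (tr : List Char) :
    cnfLoopA cs i tr = tr ++ cnfSubB (cs.drop i) := by
  fun_induction cnfLoopA cs i tr with
  | case1 i tr h hc ih =>
    obtain ⟨h3, h1, h2⟩ := hc
    rw [ih, drop_four cs i h3]
    simp only [List.getElem!_eq_getElem?_getD, List.getElem?_eq_getElem (by omega : i < cs.length),
      List.getElem?_eq_getElem h3, List.getElem?_eq_getElem (show i+1 < cs.length by omega),
      List.getElem?_eq_getElem (show i+2 < cs.length by omega), Option.getD_some] at h1 h2 ⊢
    rw [h1, h2, cnfSubB]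
    simp
  | case2 i tr h hc ih =>
    rw [ih, List.drop_eq_getElem_cons h, cnfSubB_nomatch]
    · simp only [List.getElem!_eq_getElem?_getD, List.getElem?_eq_getElem h, Option.getD_some]
      simp
    · rintro ⟨h1, a, b, r, hr⟩
      have hlen : (cs.drop (i+1)).length ≥ 3 := by rw [hr]; simp
      rw [List.length_drop] at hlen
      have h3 : i + 3 < cs.length := by omega
      have := drop_four cs i h3
      rw [List.drop_eq_getElem_cons h] at this
      injection this with _ this
      rw [hr] at this
      injection this with e1 this; injection this with e2 this; injection this with e3 _
      apply hc
      refine ⟨h3, ?_, ?_⟩ <;>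
        simp only [List.getElem!_eq_getElem?_getD, List.getElem?_eq_getElem h,
          List.getElem?_eq_getElem h3, Option.getD_some]
      · exact h1
      · exact e3.symm
  | case3 i tr h =>
    rw [List.drop_eq_nil_of_le (by omega)]
    simp [cnfSubB]

-- A's append-accumulator loop over the rules is a map.
lemma foldl_append_map (f : String → String) (l : List String) (a0 : List String) :
    l.foldl (fun acc r => acc ++ [f r]) a0 = a0 ++ l.map f := by
  induction l generalizing a0 with
  | nil => simp
  | cons x xs ih => simp [List.foldl_cons, ih]

-- ===== VERDICT (by name: the statement is the Claim_ definition above) =====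
theorem cnf_transform_grammar_spec : Claim_equal_cnf_transform_grammar := by
  intro grammar _
  show cnf_transform_grammar grammar = cnf_transform_grammar_alt grammar
  unfold cnf_transform_grammar cnf_transform_grammar_alt
  congr 1
  have hfun : ∀ (d : PySem.Dict String (List String)) (p : String × List String),
      d.insert p.1 (p.2.foldl (fun acc rule => acc ++ [String.mk (cnfLoopA rule.toList 0 [])]) [])
        = d.insert p.1 (p.2.map (fun rule => String.mk (cnfSubB rule.toList))) := by
    intro d p
    have : ∀ rule : String, String.mk (cnfLoopA rule.toList 0 []) = String.mk (cnfSubB rule.toList) := by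
      intro rule; rw [cnfLoopA_eq]; rfl
    simp only [foldl_append_map (fun rule => String.mk (cnfLoopA rule.toList 0 [])), List.nil_append]
    congr 1
    exact List.map_congr_left (fun r _ => this r)
  exact List.foldl_ext _ _ _ (fun d p _ => hfun d p)
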